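-- pv_equiv track=rewrite | github.com/MohamedA95/AOHW25_795 | streamlit_app/utils.py | compute_unet_params
-- ===== SOURCE A (Python) =====
-- def compute_unet_params(num_levels, base_filters, input_channels=3):
--     """
--     Computes approximate number of parameters for a U-Net.
--
--     Args:
--         num_levels (int): number of encoder/decoder levels
--         base_filters (int): number of filters in the first layer
--         input_channels (int): number of channels in input image
--
--     Returns:
--         total_params (int)
--     """
--     total_params = 0
--     in_ch = input_channels
--
--     # Encoder
--     for level in range(num_levels):
--         out_ch = base_filters * (2 ** level)
--         # Two conv layers per level
--         total_params += (in_ch * 3 * 3 * out_ch) + out_ch      # Conv1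
--         total_params += (out_ch * 3 * 3 * out_ch) + out_ch      # Conv2
--         in_ch = out_ch
--
--     # Bottleneck (2 conv layers)
--     out_ch = base_filters * (2 ** num_levels)
--     total_params += (in_ch * 3 * 3 * out_ch) + out_ch
--     total_params += (out_ch * 3 * 3 * out_ch) + out_ch
--
--     # Decoder
--     for level in reversed(range(num_levels)):
--         out_ch = base_filters * (2 ** level)
--         # Two conv layers per level
--         total_params += (in_ch * 3 * 3 * out_ch) + out_ch
--         total_params += (out_ch * 3 * 3 * out_ch) + out_ch
--         in_ch = out_ch
--
--     return total_params
-- ===== SOURCE B (Python) =====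
-- def compute_unet_params(num_levels, base_filters, input_channels=3):
--     # Closed form: the per-level 3x3-conv parameter counts form geometric series
--     # in 4**level (weights) and 2**level (biases); summing them gives O(1) arithmetic.
--     b, c = base_filters, input_channels
--     if num_levels == 0:
--         return 9 * c * b + 9 * b * b + 2 * b
--     return (9 * c * b
--             + b * b * (99 * 4 ** (num_levels - 1) - 18)
--             + b * (12 * 2 ** (num_levels - 1) - 4))
-- ===== Notes on version B (the rewrite author's own statement) =====
-- stated objective: faster
-- what changed: Replaces both per-level loops by an O(1) closed-form expression obtained by summing the geometric series of per-level weight (4**level) and bias (2**level) terms.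
-- outside the precondition, e.g. on compute_unet_params(-1, 2, 3): A returns 38.0, B returns 4.75
import Mathlib
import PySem

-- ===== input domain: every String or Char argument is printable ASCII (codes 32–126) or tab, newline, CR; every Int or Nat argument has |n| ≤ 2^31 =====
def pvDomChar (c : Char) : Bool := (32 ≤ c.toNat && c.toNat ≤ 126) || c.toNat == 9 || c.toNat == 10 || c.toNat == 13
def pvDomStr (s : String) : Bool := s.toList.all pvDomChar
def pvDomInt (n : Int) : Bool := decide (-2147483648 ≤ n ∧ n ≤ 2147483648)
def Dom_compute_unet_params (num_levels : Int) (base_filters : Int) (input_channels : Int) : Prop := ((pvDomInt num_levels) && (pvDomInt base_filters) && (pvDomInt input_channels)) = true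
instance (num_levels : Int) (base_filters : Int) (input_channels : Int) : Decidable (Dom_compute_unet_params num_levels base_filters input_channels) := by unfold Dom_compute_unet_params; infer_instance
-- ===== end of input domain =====

-- B replaces A's two per-level loops by a closed-form geometric-series sum (O(1) arithmetic).


-- ===== PORT A =====
-- loop body shared by A's encoder and decoder loops (identical in the Python source);
-- state = (total_params, in_ch).  'level.toNat' is exact: every level drawn from
-- range(num_levels) is ≥ 0 (and Pre_ gives 0 ≤ num_levels for the bottleneck's 2 ** num_levels).
def pvConvStep (base_filters : Int) (s : Int × Int) (level : Int) : Int × Int :=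
  let out_ch := base_filters * 2 ^ level.toNat
  (s.1 + ((s.2 * 3 * 3 * out_ch) + out_ch) + ((out_ch * 3 * 3 * out_ch) + out_ch), out_ch)

def compute_unet_params (num_levels : Int) (base_filters : Int) (input_channels : Int) : Int :=
  -- Encoder
  let enc := (PySem.List.pyRange 0 num_levels 1).foldl (pvConvStep base_filters) (0, input_channels)
  -- Bottleneck (note: the Python does NOT update in_ch here)
  let out_ch := base_filters * 2 ^ num_levels.toNat
  let t2 := enc.1 + ((enc.2 * 3 * 3 * out_ch) + out_ch) + ((out_ch * 3 * 3 * out_ch) + out_ch)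
  -- Decoder (in_ch still = encoder's last out_ch, as in the Python)
  let dec := ((PySem.List.pyRange 0 num_levels 1).reverse).foldl (pvConvStep base_filters) (t2, enc.2)
  dec.1

-- ===== PORT B =====
def compute_unet_params_alt (num_levels : Int) (base_filters : Int) (input_channels : Int) : Int :=
  let b := base_filters
  let c := input_channels
  if num_levels = 0 then 9 * c * b + 9 * b * b + 2 * b
  else 9 * c * b + b * b * (99 * 4 ^ (num_levels - 1).toNat - 18)
       + b * (12 * 2 ^ (num_levels - 1).toNat - 4)

-- ===== PRECONDITION & SPEC =====
-- Pre_ excludes num_levels < 0, where Python's 2 ** num_levels is a float, so A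
-- (and B) return a float instead of an int.
def Pre_compute_unet_params (num_levels : Int) (base_filters : Int) (input_channels : Int) : Prop :=
  0 ≤ num_levels
instance (num_levels : Int) (base_filters : Int) (input_channels : Int) : Decidable (Pre_compute_unet_params num_levels base_filters input_channels) := by unfold Pre_compute_unet_params; infer_instance

def pvWitness_compute_unet_params : Int × Int × Int := (2, 3, 1)

def Spec_compute_unet_params (num_levels : Int) (base_filters : Int) (input_channels : Int) (out : Int) : Prop := out = compute_unet_params_alt num_levels base_filters input_channels
instance (num_levels : Int) (base_filters : Int) (input_channels : Int) (out : Int) : Decidable (Spec_compute_unet_params num_levels base_filters input_channels out) := by unfold Spec_compute_unet_params; infer_instance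

-- ===== CLAIM (what is proved, stated in full; the proofs are below) =====
def Claim_equal_compute_unet_params : Prop := ∀ (num_levels : Int) (base_filters : Int) (input_channels : Int), Dom_compute_unet_params num_levels base_filters input_channels → Pre_compute_unet_params num_levels base_filters input_channels → Spec_compute_unet_params num_levels base_filters input_channels (compute_unet_params num_levels base_filters input_channels)

-- ===== LEMMAS AND PROOFS =====

-- Encoder loop: closed form of the fold over range(k+1); in_ch ends at b * 2^k.
lemma pv_enc (b c : Int) : ∀ k : Nat,
    (PySem.List.pyRange 0 ((k : Int) + 1) 1).foldl (pvConvStep b) (0, c)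
      = (9*c*b - 9*b*b + 18*b*b*4^k + 4*b*2^k - 2*b, b * 2^k) := by
  intro k
  induction k with
  | zero =>
    have h1 : PySem.List.pyRange 0 ((0 : Int) + 1) 1 = [0] := by decide
    simp only [Nat.cast_zero, h1, List.foldl_cons, List.foldl_nil, pvConvStep,
      Int.toNat_zero, pow_zero, Prod.mk.injEq]
    refine ⟨by ring, trivial⟩
  | succ k ih =>
    have hc : ((k + 1 : Nat) : Int) = (k : Int) + 1 := by push_cast; ring
    have h : PySem.List.pyRange 0 ((k : Int) + 1 + 1) 1
        = PySem.List.pyRange 0 ((k : Int) + 1) 1 ++ [(k : Int) + 1] := by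
      have := PySem.List.pyRange_one_succ_right (a := 0) (b := (k : Int) + 1) (by positivity)
      simpa using this
    rw [hc, h, List.foldl_append, ih]
    have ht : ((k : Int) + 1).toNat = k + 1 := by omega
    simp only [pvConvStep, List.foldl, ht, Prod.mk.injEq]
    refine ⟨?_, trivial⟩
    simp only [show (4:Int) = 2*2 from by norm_num, mul_pow]
    ring

-- Decoder tail: fold over reversed range(m) starting with in_ch = b * 2^m.
lemma pv_dec (b : Int) : ∀ (m : Nat) (t : Int),
    ((PySem.List.pyRange 0 (m : Int) 1).reverse).foldl (pvConvStep b) (t, b * 2^m)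
      = (t + 9*b*b*(4^m - 1) + 2*b*(2^m - 1), b * 2^0) := by
  intro m
  induction m with
  | zero => intro t; simp [PySem.List.pyRange_one_eq_nil]
  | succ m ih =>
    intro t
    have hc : ((m + 1 : Nat) : Int) = (m : Int) + 1 := by push_cast; ring
    have h : PySem.List.pyRange 0 ((m : Int) + 1) 1
        = PySem.List.pyRange 0 (m : Int) 1 ++ [(m : Int)] := by
      have := PySem.List.pyRange_one_succ_right (a := 0) (b := (m : Int)) (by positivity)
      simpa using this
    rw [hc, h, List.reverse_append]
    simp only [List.reverse_singleton, List.singleton_append, List.foldl_cons]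
    have hstep : pvConvStep b (t, b * 2 ^ (m + 1)) (m : Int)
        = (t + 27*b*b*4^m + 2*b*2^m, b * 2^m) := by
      simp only [pvConvStep, Int.toNat_natCast, Prod.mk.injEq]
      refine ⟨?_, trivial⟩
      simp only [show (4:Int) = 2*2 from by norm_num, mul_pow]
      ring
    rw [hstep, ih]
    simp only [Prod.mk.injEq]
    refine ⟨?_, trivial⟩
    simp only [show (4:Int) = 2*2 from by norm_num, mul_pow]
    ring

-- ===== VERDICT (by name: the statement is the Claim_ definition above) =====
theorem compute_unet_params_spec : Claim_equal_compute_unet_params := by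
  intro n b c _ hpre
  unfold Spec_compute_unet_params compute_unet_params compute_unet_params_alt
  have hn : ((n.toNat : Nat) : Int) = n := Int.toNat_of_nonneg hpre
  rcases Nat.eq_zero_or_pos n.toNat with h0 | hpos
  · have : n = 0 := by omega
    subst this
    simp [PySem.List.pyRange_one_eq_nil]
    ring
  · obtain ⟨k, hk⟩ : ∃ k, n.toNat = k + 1 := ⟨n.toNat - 1, by omega⟩
    have hnk : n = (k : Int) + 1 := by omega
    subst hnk
    have htn : (((k : Int) + 1).toNat) = k + 1 := by omega
    rw [pv_enc b c k]
    simp only [htn]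
    -- decoder: split off level k, then pv_dec
    have h : PySem.List.pyRange 0 ((k : Int) + 1) 1
        = PySem.List.pyRange 0 (k : Int) 1 ++ [(k : Int)] := by
      have := PySem.List.pyRange_one_succ_right (a := 0) (b := (k : Int)) (by positivity)
      simpa using this
    rw [h, List.reverse_append]
    simp only [List.reverse_singleton, List.singleton_append, List.foldl_cons]
    have hstep : ∀ t : Int, pvConvStep b (t, b * 2 ^ k) (k : Int)
        = (t + 18*b*b*4^k + 2*b*2^k, b * 2^k) := by
      intro t
      simp only [pvConvStep, Int.toNat_natCast, Prod.mk.injEq]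
      refine ⟨?_, trivial⟩
      simp only [show (4:Int) = 2*2 from by norm_num, mul_pow]
      ring
    rw [hstep, pv_dec b k]
    have hne : ¬ ((k : Int) + 1 = 0) := by omega
    have hm1 : (((k : Int) + 1 - 1).toNat) = k := by omega
    simp only [if_neg hne, hm1]
    simp only [show (4:Int) = 2*2 from by norm_num, mul_pow]
    ring
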